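-- pv_equiv track=rewrite | github.com/KuperWezzel/Games | metropolis/helper.py | text_generator
-- ===== SOURCE A (Python) =====
-- def text_generator(items, pre: str, post: str, sep=", ", final_sep=" and ") -> str:
--     out = pre
--     for i, item in enumerate(items):
--         if i == len(items) - 2:
--             out += str(item) + final_sep
--         elif i == len(items) - 1:
--             out += str(item)
--         else:
--             out += str(item) + sep
--     out += post
--     return out
-- ===== SOURCE B (Python) =====
-- def text_generator(items, pre: str, post: str, sep=", ", final_sep=" and ") -> str:
--     parts = [str(x) for x in items]
--     if len(parts) > 1:
--         body = sep.join(parts[:-1]) + final_sep + parts[-1]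
--     elif len(parts) == 1:
--         body = parts[0]
--     else:
--         body = ""
--     return pre + body + post
-- ===== Notes on version B (the rewrite author's own statement) =====
-- stated objective: simpler
-- what changed: Replaces the per-index position-aware branching inside the loop by a head/tail decomposition: join all but the last item with sep, then append final_sep and the last item.
import Mathlib
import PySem

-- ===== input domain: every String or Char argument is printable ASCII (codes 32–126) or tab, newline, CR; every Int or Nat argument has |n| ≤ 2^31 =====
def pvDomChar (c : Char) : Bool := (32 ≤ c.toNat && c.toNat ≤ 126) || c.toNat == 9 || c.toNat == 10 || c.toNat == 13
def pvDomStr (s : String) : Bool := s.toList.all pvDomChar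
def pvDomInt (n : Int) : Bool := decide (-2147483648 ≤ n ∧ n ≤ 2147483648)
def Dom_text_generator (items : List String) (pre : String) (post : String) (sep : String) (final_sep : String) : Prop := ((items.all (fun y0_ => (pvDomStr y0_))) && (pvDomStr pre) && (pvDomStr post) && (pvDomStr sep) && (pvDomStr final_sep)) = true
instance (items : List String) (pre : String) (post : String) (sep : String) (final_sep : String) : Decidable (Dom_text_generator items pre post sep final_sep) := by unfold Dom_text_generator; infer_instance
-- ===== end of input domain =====

-- B replaces A's per-index branching loop by a head/tail decomposition (join all but the
-- last item with sep, then final_sep and the last item): simpler, same O(n) cost.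

-- ===== PORT A =====
-- literal port of A: accumulate `out`, branching on the position of each enumerated item
def text_generator (items : List String) (pre : String) (post : String) (sep : String) (final_sep : String) : String :=
  let out := (PySem.List.enumerate items 0).foldl
    (fun out p =>
      if p.1 = (items.length : Int) - 2 then out ++ p.2 ++ final_sep
      else if p.1 = (items.length : Int) - 1 then out ++ p.2
      else out ++ p.2 ++ sep) pre
  out ++ post

-- ===== PORT B =====
-- literal port of Source B: parts = items (str(x) is the identity on strings);
-- parts[:-1] is dropLast, parts[-1] is getLastD, sep.join is PySem.Str.join
def text_generator_alt (items : List String) (pre : String) (post : String) (sep : String) (final_sep : String) : String :=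
  let parts := items
  let body :=
    if parts.length > 1 then
      PySem.Str.join sep parts.dropLast ++ final_sep ++ parts.getLastD ""
    else if parts.length = 1 then
      parts.headD ""
    else ""
  pre ++ body ++ post

-- ===== PRECONDITION & SPEC =====
def Spec_text_generator (items : List String) (pre : String) (post : String) (sep : String) (final_sep : String) (out : String) : Prop := out = text_generator_alt items pre post sep final_sep
instance (items : List String) (pre : String) (post : String) (sep : String) (final_sep : String) (out : String) : Decidable (Spec_text_generator items pre post sep final_sep out) := by unfold Spec_text_generator; infer_instance

-- ===== CLAIM (what is proved, stated in full; the proofs are below) =====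
def Claim_equal_text_generator : Prop := ∀ (items : List String) (pre : String) (post : String) (sep : String) (final_sep : String), Dom_text_generator items pre post sep final_sep → Spec_text_generator items pre post sep final_sep (text_generator items pre post sep final_sep)

-- ===== LEMMAS AND PROOFS =====

theorem join_cons' (s y z : String) (l : List String) :
    PySem.Str.join s (y :: z :: l) = y ++ s ++ PySem.Str.join s (z :: l) := by
  apply String.toList_inj.mp
  simp [PySem.Str.join, PySem.Chars.join_cons_cons, String.toList_append]

theorem join_single (s y : String) : PySem.Str.join s [y] = y := by
  simp [PySem.Str.join]

-- A's loop over l ++ [y, z] starting at index s, when s + |l| = n - 2: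
-- every element of l takes the "else" branch, y takes the final_sep branch, z the last branch.
theorem foldA_key (l : List String) (y z sep fs : String) (s n : Int)
    (h : s + l.length = n - 2) (acc : String) :
    (PySem.List.enumerate (l ++ [y, z]) s).foldl
      (fun out p =>
        if p.1 = n - 2 then out ++ p.2 ++ fs
        else if p.1 = n - 1 then out ++ p.2
        else out ++ p.2 ++ sep) acc
    = acc ++ PySem.Str.join sep (l ++ [y]) ++ fs ++ z := by
  induction l generalizing s acc with
  | nil =>
    have hs : s = n - 2 := by simpa using h
    subst hs
    simp only [List.nil_append]
    rw [PySem.List.enumerate_cons, PySem.List.enumerate_cons, PySem.List.enumerate_nil]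
    simp only [List.foldl_cons, List.foldl_nil]
    rw [join_single]
    split_ifs <;> first | rfl | omega
  | cons x t ih =>
    have hx : s + 1 + (t.length : Int) = n - 2 := by
      simp only [List.length_cons] at h; push_cast at h ⊢; omega
    rw [List.cons_append, PySem.List.enumerate_cons, List.foldl_cons]
    rw [if_neg (by omega : ¬ (s = n - 2)), if_neg (by omega : ¬ (s = n - 1))]
    rw [ih (s + 1) hx (acc ++ x ++ sep)]
    cases t with
    | nil => simp [join_cons', join_single, String.append_assoc]
    | cons w u => simp [join_cons', String.append_assoc]

-- the ≥2-items case, with the list written as l ++ [y, z]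
theorem long_case (l : List String) (y z pre post sep fs : String) :
    text_generator (l ++ [y, z]) pre post sep fs
      = text_generator_alt (l ++ [y, z]) pre post sep fs := by
  simp only [text_generator, text_generator_alt]
  rw [foldA_key l y z sep fs 0 ((l ++ [y, z]).length : Int)
    (by simp only [List.length_append, List.length_cons, List.length_nil]; push_cast; omega) pre]
  have hgt : (l ++ [y, z]).length > 1 := by simp
  rw [if_pos hgt]
  have hdl : (l ++ [y, z]).dropLast = l ++ [y] := by
    rw [show l ++ [y, z] = (l ++ [y]) ++ [z] by simp]
    simp
  have hlast : (l ++ [y, z]).getLastD "" = z := by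
    rw [show l ++ [y, z] = (l ++ [y]) ++ [z] by simp]
    simp
  rw [hdl, hlast]
  simp [String.append_assoc]

theorem text_generator_eq (items : List String) (pre post sep fs : String) :
    text_generator items pre post sep fs = text_generator_alt items pre post sep fs := by
  cases items with
  | nil =>
    simp [text_generator, text_generator_alt, PySem.List.enumerate_nil]
  | cons a t =>
    cases ht : t.reverse with
    | nil =>
      have : t = [] := by simpa using congrArg List.reverse ht
      subst this
      simp [text_generator, text_generator_alt, PySem.List.enumerate_cons,
        PySem.List.enumerate_nil, List.foldl]
    | cons z r =>
      cases r with
      | nil =>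
        have hz : t = [z] := by simpa using congrArg List.reverse ht
        subst hz
        exact long_case [] a z pre post sep fs
      | cons y q =>
        have hitems : a :: t = (a :: q.reverse) ++ [y, z] := by
          have := congrArg List.reverse ht
          simp at this
          simp [this]
        rw [hitems]
        exact long_case (a :: q.reverse) y z pre post sep fs

-- ===== VERDICT (by name: the statement is the Claim_ definition above) =====
theorem text_generator_spec : Claim_equal_text_generator := by
  intro items pre post sep fs _
  exact text_generator_eq items pre post sep fs
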